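-- pv_equiv track=rewrite | github.com/ellieko/algorithms | top100/dongbinna/2_1_Greedy.py | adventure_guild
-- ===== SOURCE A (Python) =====
-- def adventure_guild(n, fear_list):
--     fear_list.sort()
--     group_num = 0
--     group_mem_count = 0
--     for fear in fear_list:
--         group_mem_count += 1
--         if fear <= group_mem_count:
--             group_num += 1
--             group_mem_count = 0
--     return group_num
-- ===== SOURCE B (Python) =====
-- def adventure_guild(n, fear_list):
--     # Batch greedy over a frequency table: same result as a per-element scan of
--     # the sorted list, but groups whole blocks of equal fear values arithmetically.
--     counts = {}
--     for f in fear_list: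
--         counts[f] = counts.get(f, 0) + 1
--     groups = 0
--     m = 0  # members waiting in the currently-forming group
--     for f in sorted(counts):
--         c = counts[f]
--         if f <= 0:
--             groups += c
--             m = 0
--         else:
--             groups += (m + c) // f
--             m = (m + c) % f
--     return groups
-- ===== Notes on version B (the rewrite author's own statement) =====
-- stated objective: alternative
-- what changed: B replaces A's sort-then-per-element scan with a frequency dictionary plus one arithmetic batch step (quotient/remainder) per distinct fear value; it trades the per-element greedy loop for counting and division, cheaper only on duplicate-heavy inputs.
import Mathlib
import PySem

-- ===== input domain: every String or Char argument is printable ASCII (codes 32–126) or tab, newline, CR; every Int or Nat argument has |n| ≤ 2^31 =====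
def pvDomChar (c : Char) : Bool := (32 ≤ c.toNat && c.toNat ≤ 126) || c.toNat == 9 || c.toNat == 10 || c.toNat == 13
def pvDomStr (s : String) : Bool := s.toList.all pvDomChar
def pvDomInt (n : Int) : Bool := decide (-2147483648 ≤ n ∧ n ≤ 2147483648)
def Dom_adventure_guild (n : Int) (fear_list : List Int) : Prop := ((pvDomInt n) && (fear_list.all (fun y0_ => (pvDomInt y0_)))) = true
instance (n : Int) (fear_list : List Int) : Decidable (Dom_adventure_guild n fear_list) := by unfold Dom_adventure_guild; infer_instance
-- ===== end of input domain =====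

-- B counts fears into a dictionary and forms groups arithmetically per distinct fear
-- value (alternative algorithm: one batch step per distinct value instead of a
-- per-element greedy scan of the sorted list). Note: A sorts fear_list in place;
-- the equivalence proved here is about the RETURN value only.


-- ===== PORT A =====
def adventure_guild (n : Int) (fear_list : List Int) : Int :=
  let sorted := PySem.List.sorted fear_list (fun x => x) false
  let st := sorted.foldl (fun (st : Int × Int) fear =>
      let group_mem_count := st.2 + 1
      if fear ≤ group_mem_count then (st.1 + 1, 0) else (st.1, group_mem_count))
    (0, 0)
  st.1

-- ===== PORT B =====
def adventure_guild_alt (n : Int) (fear_list : List Int) : Int :=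
  let counts : PySem.Dict Int Int :=
    fear_list.foldl (fun d f => d.insert f (d.getD f 0 + 1)) PySem.Dict.empty
  let st := (PySem.List.sorted counts.keys (fun x => x) false).foldl
    (fun (st : Int × Int) f =>
      let c := counts.getD f 0
      if f ≤ 0 then (st.1 + c, 0)
      else (st.1 + PySem.Int.floordiv (st.2 + c) f, PySem.Int.mod (st.2 + c) f))
    (0, 0)
  st.1

-- ===== PRECONDITION & SPEC =====
def Spec_adventure_guild (n : Int) (fear_list : List Int) (out : Int) : Prop := out = adventure_guild_alt n fear_list
instance (n : Int) (fear_list : List Int) (out : Int) : Decidable (Spec_adventure_guild n fear_list out) := by unfold Spec_adventure_guild; infer_instance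

-- ===== CLAIM (what is proved, stated in full; the proofs are below) =====
def Claim_equal_adventure_guild : Prop := ∀ (n : Int) (fear_list : List Int), Dom_adventure_guild n fear_list → Spec_adventure_guild n fear_list (adventure_guild n fear_list)

-- ===== LEMMAS AND PROOFS =====

def pvStepA (st : Int × Int) (fear : Int) : Int × Int :=
  if fear ≤ st.2 + 1 then (st.1 + 1, 0) else (st.1, st.2 + 1)

theorem pv_batch (f g m : Int) (c : Nat) (hm : 0 ≤ m) (hmf : 0 < f → m < f)
    (hneg : f ≤ 0 → m = 0) :
    (List.replicate c f).foldl pvStepA (g, m)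
      = if f ≤ 0 then (g + c, 0)
        else (g + PySem.Int.floordiv (m + c) f, PySem.Int.mod (m + c) f) := by
  induction c generalizing g m with
  | zero =>
    simp only [List.replicate_zero, List.foldl_nil, Nat.cast_zero, add_zero]
    split_ifs with hf
    · rw [hneg hf]
    · push Not at hf
      rw [PySem.Int.floordiv_eq_ediv_of_pos hf, PySem.Int.mod_eq_emod_of_pos hf]
      simp only [Prod.mk.injEq]
      constructor
      · rw [Int.ediv_eq_zero_of_lt hm (hmf hf)]; ring
      · exact (Int.emod_eq_of_lt hm (hmf hf)).symm
  | succ c ih =>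
    rw [List.replicate_succ, List.foldl_cons]
    by_cases hf : f ≤ 0
    · have hstep : pvStepA (g, m) f = (g + 1, 0) := by
        simp only [pvStepA, if_pos (by omega : f ≤ m + 1)]
      rw [hstep, ih (g + 1) 0 le_rfl (by intro h; omega) (fun _ => rfl)]
      simp only [if_pos hf]
      push_cast
      simp only [Prod.mk.injEq, and_true]
      ring
    · push Not at hf
      have hmlt := hmf hf
      by_cases he : m + 1 = f
      · have hstep : pvStepA (g, m) f = (g + 1, 0) := by
          simp only [pvStepA, if_pos (by omega : f ≤ m + 1)]
        rw [hstep, ih (g + 1) 0 le_rfl (by intro _; omega) (by intro h; omega)]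
        simp only [if_neg (by omega : ¬ f ≤ 0)]
        rw [PySem.Int.floordiv_eq_ediv_of_pos hf, PySem.Int.mod_eq_emod_of_pos hf,
            PySem.Int.floordiv_eq_ediv_of_pos hf, PySem.Int.mod_eq_emod_of_pos hf]
        have h1 : m + ((c : Int) + 1) = (c : Int) + 1 * f := by omega
        push_cast
        rw [h1, Int.add_mul_ediv_right _ _ (by omega : f ≠ 0), Int.add_mul_emod_self_right]
        simp only [Prod.mk.injEq]
        constructor
        · ring
        · simp
      · have hstep : pvStepA (g, m) f = (g, m + 1) := by
          simp only [pvStepA, if_neg (by omega : ¬ f ≤ m + 1)]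
        rw [hstep, ih g (m + 1) (by omega) (by intro _; omega) (by intro h; omega)]
        simp only [if_neg (by omega : ¬ f ≤ 0)]
        push_cast
        have h2 : m + 1 + (c : Int) = m + ((c : Int) + 1) := by ring
        rw [h2]

theorem pv_fold_expand (cnt : Int → Nat) (ks : List Int) (g m : Int)
    (hsort : ks.Pairwise (· < ·)) (hm : 0 ≤ m)
    (hmf : ∀ f ∈ ks, 0 < f → m < f) (hneg : ∀ f ∈ ks, f ≤ 0 → m = 0) :
    (ks.flatMap (fun f => List.replicate (cnt f) f)).foldl pvStepA (g, m)
      = ks.foldl (fun st f =>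
          if f ≤ 0 then (st.1 + (cnt f : Int), 0)
          else (st.1 + PySem.Int.floordiv (st.2 + cnt f) f, PySem.Int.mod (st.2 + cnt f) f)) (g, m) := by
  induction ks generalizing g m with
  | nil => simp
  | cons f ks ih =>
    rw [List.flatMap_cons, List.foldl_append, List.foldl_cons]
    rw [List.pairwise_cons] at hsort
    rw [pv_batch f g m (cnt f) hm (hmf f (by simp)) (hneg f (by simp))]
    by_cases hf : f ≤ 0
    · simp only [if_pos hf]
      exact ih (g + cnt f) 0 hsort.2 le_rfl (by intro f' _ _; omega)
        (by intro f' _ _; rfl)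
    · push Not at hf
      simp only [if_neg (by omega : ¬ f ≤ 0)]
      exact ih _ _ hsort.2 (PySem.Int.mod_nonneg _ hf)
        (by intro f' hf' _
            have h1 := PySem.Int.mod_lt (m + (cnt f : Int)) hf
            have h2 := hsort.1 f' hf'
            omega)
        (by intro f' hf' h
            have := hsort.1 f' hf'
            omega)

theorem pv_mem_of_mem_flatMap {x : Int} {ks : List Int} {cnt : Int → Nat}
    (h : x ∈ ks.flatMap (fun f => List.replicate (cnt f) f)) : x ∈ ks := by
  rw [List.mem_flatMap] at h
  obtain ⟨f, hf, hx⟩ := h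
  rw [List.eq_of_mem_replicate hx]
  exact hf

theorem pv_count_flatMap (xs ks : List Int) (a : Int) (hnd : ks.Nodup) :
    (ks.flatMap (fun f => List.replicate (xs.count f) f)).count a
      = if a ∈ ks then xs.count a else 0 := by
  induction ks with
  | nil => simp
  | cons f ks ih =>
    rw [List.nodup_cons] at hnd
    rw [List.flatMap_cons, List.count_append, List.count_replicate, ih hnd.2]
    by_cases hfa : f = a
    · subst hfa
      simp [hnd.1]
    · simp [hfa, Ne.symm hfa, List.mem_cons]

theorem pv_sorted_eq_expand (xs : List Int) :
    PySem.List.sorted xs (fun x => x) false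
      = (PySem.List.sorted (PySem.Set.ofList xs) (fun x => x) false).flatMap
          (fun f => List.replicate (xs.count f) f) := by
  have hlt := PySem.List.sorted_ofList_pairwise_lt xs
  have hnd : (PySem.List.sorted (PySem.Set.ofList xs) (fun x => x) false).Nodup :=
    hlt.imp (fun h => ne_of_lt h)
  apply PySem.List.sorted_id_eq_of_perm_of_pairwise
  · -- permutation: counts agree
    rw [List.perm_iff_count]
    intro a
    rw [pv_count_flatMap xs _ a hnd]
    by_cases hin : a ∈ PySem.List.sorted (PySem.Set.ofList xs) (fun x => x) false
    · rw [if_pos hin]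
    · rw [if_neg hin, Eq.comm, List.count_eq_zero]
      intro hx
      exact hin ((PySem.List.mem_sorted _ _ _ a).2 ((PySem.Set.mem_ofList xs a).2 hx))
  · -- pairwise ≤
    generalize PySem.List.sorted (PySem.Set.ofList xs) (fun x => x) false = ks at hlt
    induction ks with
    | nil => simp
    | cons f ks ih =>
      rw [List.flatMap_cons, List.pairwise_append]
      rw [List.pairwise_cons] at hlt
      refine ⟨List.pairwise_replicate.2 (Or.inr le_rfl), ih hlt.2, ?_⟩
      intro a ha b hb
      rw [List.eq_of_mem_replicate ha]
      exact le_of_lt (hlt.1 b (pv_mem_of_mem_flatMap hb))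


-- ===== VERDICT (by name: the statement is the Claim_ definition above) =====
theorem adventure_guild_spec : Claim_equal_adventure_guild := by
  intro n fl _
  show adventure_guild n fl = adventure_guild_alt n fl
  unfold adventure_guild adventure_guild_alt
  rw [PySem.Dict.foldl_insert_getD_add_one_eq_counter]
  dsimp only
  rw [PySem.Dict.keys_counter]
  conv_rhs => rw [PySem.List.foldl_congr_mem _ _
      (fun (st : Int × Int) f =>
        if f ≤ 0 then (st.1 + ((fl.count f : Nat) : Int), 0)
        else (st.1 + PySem.Int.floordiv (st.2 + (fl.count f : Nat)) f,
              PySem.Int.mod (st.2 + (fl.count f : Nat)) f)) _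
      (by intro acc x hx; rw [PySem.Dict.getD_counter])]
  rw [pv_sorted_eq_expand fl]
  have h := pv_fold_expand (fun f => fl.count f)
      (PySem.List.sorted (PySem.Set.ofList fl) (fun x => x) false) 0 0
      (PySem.List.sorted_ofList_pairwise_lt fl) le_rfl
      (by intro f _ hf; omega) (by intro f _ _; rfl)
  exact congrArg Prod.fst h
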